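-- pv_equiv track=rewrite | github.com/jamiewannenburg/uacalcsrc | python/uacalc/io.py | _parse_row_values_safe
-- ===== SOURCE A (Python) =====
-- from typing import Dict, List, Tuple, Union, Optional, Any
--
-- def _parse_row_values_safe(row_text: str, cardinality: int, op_name: str, file_path: str) -> Optional[List[int]]:
--     """Parse comma-separated values from a row, returning None on error (for validation mode)."""
--     try:
--         # Split by comma and convert to integers
--         values = []
--         for value_str in row_text.split(','):
--             value_str = value_str.strip()
--             if not value_str:
--                 continue
--
--             try:
--                 value = int(value_str)
--             except ValueError:
--                 # Don't raise, just return None to indicate error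
--                 return None
--
--             if value < 0 or value >= cardinality:
--                 # Don't raise, just return None to indicate error
--                 return None
--
--             values.append(value)
--
--         return values
--
--     except Exception:
--         # Don't raise, just return None to indicate error
--         return None
-- ===== SOURCE B (Python) =====
-- from typing import List, Optional
--
-- def _parse_segment(tokens: List[str], lo: int, hi: int, cardinality: int) -> Optional[List[int]]:
--     """Parse/validate tokens[lo:hi] by divide and conquer; None signals any error in the segment."""
--     if hi - lo == 0:
--         return []
--     if hi - lo == 1:
--         tok = tokens[lo].strip()
--         if not tok:
--             return []
--         try:
--             v = int(tok)
--         except ValueError: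
--             return None
--         if v < 0 or v >= cardinality:
--             return None
--         return [v]
--     mid = (lo + hi) // 2
--     left = _parse_segment(tokens, lo, mid, cardinality)
--     if left is None:
--         return None
--     right = _parse_segment(tokens, mid, hi, cardinality)
--     if right is None:
--         return None
--     return left + right
--
-- def _parse_row_values_safe(row_text: str, cardinality: int, op_name: str, file_path: str) -> Optional[List[int]]:
--     """Parse comma-separated values from a row, returning None on error (for validation mode)."""
--     try:
--         tokens = row_text.split(',')
--         return _parse_segment(tokens, 0, len(tokens), cardinality)
--     except Exception:
--         return None
-- ===== Notes on version B (the rewrite author's own statement) =====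
-- stated objective: alternative
-- what changed: Replaces A's single fused left-to-right loop with an accumulator by a divide-and-conquer recursion over the token list: each half is parsed/validated independently (None propagates) and the results are concatenated.
import Mathlib
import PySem

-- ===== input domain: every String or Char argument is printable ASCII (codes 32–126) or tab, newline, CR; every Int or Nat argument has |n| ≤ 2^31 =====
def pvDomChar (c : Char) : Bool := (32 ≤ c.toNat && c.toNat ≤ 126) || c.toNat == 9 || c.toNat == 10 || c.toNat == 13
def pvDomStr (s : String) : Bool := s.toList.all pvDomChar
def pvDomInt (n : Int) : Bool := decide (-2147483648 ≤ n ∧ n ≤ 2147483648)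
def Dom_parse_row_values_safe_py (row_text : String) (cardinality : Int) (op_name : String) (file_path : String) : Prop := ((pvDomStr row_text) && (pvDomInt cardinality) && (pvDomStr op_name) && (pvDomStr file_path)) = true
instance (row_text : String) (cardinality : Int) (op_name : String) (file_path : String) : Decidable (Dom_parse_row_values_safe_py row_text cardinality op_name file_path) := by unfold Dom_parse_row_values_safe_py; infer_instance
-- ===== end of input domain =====

-- B replaces A's fused left-to-right loop by a divide-and-conquer recursion over the token list (alternative decomposition; same values everywhere).


-- ===== PORT A =====
-- A's fused for-loop: strip, skip empty, parse (ValueError → None), range-check, append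
def pvLoopA (cardinality : Int) : List (List Char) → List Int → Option (List Int)
  | [], values => some values
  | t :: ts, values =>
    let value_str := PySem.Chars.strip t
    if value_str = [] then pvLoopA cardinality ts values
    else
      match PySem.Int.ofChars? value_str with
      | none => none
      | some value =>
        if value < 0 ∨ cardinality ≤ value then none
        else pvLoopA cardinality ts (values ++ [value])

def parse_row_values_safe_py (row_text : String) (cardinality : Int) (op_name : String) (file_path : String) : Option (List Int) :=
  pvLoopA cardinality (PySem.Chars.splitOn row_text.toList [',']) []

-- ===== PORT B =====
-- B's _parse_segment: divide-and-conquer on tokens[lo:hi]; none propagates, halves are concatenated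
def pvSeg (tokens : List (List Char)) (cardinality : Int) (lo hi : Nat) : Option (List Int) :=
  if hi - lo = 0 then some []
  else if hi - lo = 1 then
    match tokens[lo]? with
    | none => none   -- IndexError (unreachable for B's calls; caught by the outer except)
    | some t =>
      let tok := PySem.Chars.strip t
      if tok = [] then some []
      else
        match PySem.Int.ofChars? tok with
        | none => none
        | some v => if v < 0 ∨ cardinality ≤ v then none else some [v]
  else
    let mid := (lo + hi) / 2
    match pvSeg tokens cardinality lo mid with
    | none => none
    | some left =>
      match pvSeg tokens cardinality mid hi with
      | none => none
      | some right => some (left ++ right)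
termination_by hi - lo
decreasing_by all_goals omega

def parse_row_values_safe_py_alt (row_text : String) (cardinality : Int) (op_name : String) (file_path : String) : Option (List Int) :=
  let tokens := PySem.Chars.splitOn row_text.toList [',']
  pvSeg tokens cardinality 0 tokens.length

-- ===== PRECONDITION & SPEC =====
def Spec_parse_row_values_safe_py (row_text : String) (cardinality : Int) (op_name : String) (file_path : String) (out : Option (List Int)) : Prop := out = parse_row_values_safe_py_alt row_text cardinality op_name file_path
instance (row_text : String) (cardinality : Int) (op_name : String) (file_path : String) (out : Option (List Int)) : Decidable (Spec_parse_row_values_safe_py row_text cardinality op_name file_path out) := by unfold Spec_parse_row_values_safe_py; infer_instance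

-- ===== CLAIM (what is proved, stated in full; the proofs are below) =====
def Claim_equal_parse_row_values_safe_py : Prop := ∀ (row_text : String) (cardinality : Int) (op_name : String) (file_path : String), Dom_parse_row_values_safe_py row_text cardinality op_name file_path → Spec_parse_row_values_safe_py row_text cardinality op_name file_path (parse_row_values_safe_py row_text cardinality op_name file_path)

-- ===== LEMMAS AND PROOFS =====

-- linear reference semantics: what one token list parses to
def pvG (c : Int) : List (List Char) → Option (List Int)
  | [] => some []
  | t :: ts =>
    let tok := PySem.Chars.strip t
    if tok = [] then pvG c ts
    else
      match PySem.Int.ofChars? tok with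
      | none => none
      | some v => if v < 0 ∨ c ≤ v then none else (pvG c ts).map (v :: ·)

-- A's loop equals the reference semantics with the accumulator prepended
lemma pvLoopA_eq_pvG (c : Int) : ∀ (ts : List (List Char)) (acc : List Int),
    pvLoopA c ts acc = (pvG c ts).map (acc ++ ·)
  | [], acc => by simp [pvLoopA, pvG]
  | t :: ts, acc => by
    simp only [pvLoopA, pvG]
    by_cases he : PySem.Chars.strip t = []
    · simp only [he, if_true]
      exact pvLoopA_eq_pvG c ts acc
    · simp only [if_neg he]
      cases hp : PySem.Int.ofChars? (PySem.Chars.strip t) with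
      | none => rfl
      | some v =>
        by_cases hv : v < 0 ∨ c ≤ v
        · simp [hv]
        · simp only [if_neg hv]
          rw [pvLoopA_eq_pvG c ts (acc ++ [v])]
          cases pvG c ts <;> simp

-- the reference semantics is a (partial) monoid homomorphism w.r.t. append
lemma pvG_append (c : Int) : ∀ (xs ys : List (List Char)),
    pvG c (xs ++ ys) =
      match pvG c xs with
      | none => none
      | some L => (pvG c ys).map (L ++ ·)
  | [], ys => by cases hy : pvG c ys <;> simp [pvG, hy]
  | t :: xs, ys => by
    simp only [List.cons_append, pvG]
    by_cases he : PySem.Chars.strip t = []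
    · simp only [he, if_true]
      exact pvG_append c xs ys
    · simp only [if_neg he]
      cases hp : PySem.Int.ofChars? (PySem.Chars.strip t) with
      | none => rfl
      | some v =>
        by_cases hv : v < 0 ∨ c ≤ v
        · simp [hv]
        · simp only [if_neg hv]
          rw [pvG_append c xs ys]
          cases pvG c xs <;> cases pvG c ys <;> simp

-- B's divide-and-conquer on tokens[lo:hi] computes the reference semantics of that slice
lemma pvSeg_eq_pvG (tokens : List (List Char)) (c : Int) : ∀ (lo hi : Nat),
    lo ≤ hi → hi ≤ tokens.length →
    pvSeg tokens c lo hi = pvG c ((tokens.drop lo).take (hi - lo)) := by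
  intro lo hi
  induction hn : hi - lo using Nat.strong_induction_on generalizing lo hi with
  | _ n ih =>
  intro hle hlen
  subst hn
  rw [pvSeg]
  by_cases h0 : hi - lo = 0
  · simp [h0, pvG]
  · simp only [if_neg h0]
    by_cases h1 : hi - lo = 1
    · simp only [h1, if_true]
      have hlt : lo < tokens.length := by omega
      have hget : tokens[lo]? = some tokens[lo] := List.getElem?_eq_getElem hlt
      have hslice : (tokens.drop lo).take 1 = [tokens[lo]] := by
        have : tokens.drop lo = tokens[lo] :: tokens.drop (lo + 1) := List.drop_eq_getElem_cons hlt
        rw [this]; rfl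
      rw [hget, hslice]
      simp only [pvG]
      by_cases he : PySem.Chars.strip tokens[lo] = []
      · simp [he]
      · simp only [if_neg he]
        cases PySem.Int.ofChars? (PySem.Chars.strip tokens[lo]) with
        | none => rfl
        | some v =>
          by_cases hv : v < 0 ∨ c ≤ v
          · simp [hv]
          · simp [hv]
    · simp only [if_neg h1]
      have hmid : (lo + hi) / 2 = lo + (hi - lo) / 2 := by omega
      have hmidlo : lo < (lo + hi) / 2 := by omega
      have hmidhi : (lo + hi) / 2 < hi := by omega
      rw [ih (((lo + hi) / 2) - lo) (by omega) lo ((lo + hi) / 2) rfl (by omega) (by omega),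
          ih (hi - (lo + hi) / 2) (by omega) ((lo + hi) / 2) hi rfl (by omega) hlen]
      have hsplit : (tokens.drop lo).take (hi - lo) =
          (tokens.drop lo).take ((lo + hi) / 2 - lo) ++ (tokens.drop ((lo + hi) / 2)).take (hi - (lo + hi) / 2) := by
        have hadd : hi - lo = ((lo + hi) / 2 - lo) + (hi - (lo + hi) / 2) := by omega
        rw [hadd, List.take_add, List.drop_drop]
        have : lo + ((lo + hi) / 2 - lo) = (lo + hi) / 2 := by omega
        rw [this]
      rw [hsplit, pvG_append]
      cases pvG c ((tokens.drop lo).take ((lo + hi) / 2 - lo)) <;>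
        cases pvG c ((tokens.drop ((lo + hi) / 2)).take (hi - (lo + hi) / 2)) <;> simp

-- ===== VERDICT (by name: the statement is the Claim_ definition above) =====
theorem parse_row_values_safe_py_spec : Claim_equal_parse_row_values_safe_py := by
  intro row_text cardinality op_name file_path _
  unfold Spec_parse_row_values_safe_py parse_row_values_safe_py parse_row_values_safe_py_alt
  rw [pvLoopA_eq_pvG, pvSeg_eq_pvG _ _ 0 _ (Nat.zero_le _) le_rfl]
  simp
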